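-- pv_equiv track=rewrite | github.com/ledoux38/rb_multi_joueur | package/module_labyrinthe.py | creer_labyrinthe_depuis_chaine
-- ===== SOURCE A (Python) =====
-- def creer_labyrinthe_depuis_chaine(chaine):
-- 	""" je cree une list de list pour cree le labyrinthre"""
-- 	i = chaine + "\n"
-- 	ligne = []
-- 	labyrinthe = []
--
--
-- 	for y,x in enumerate(i):
-- 		if x != "\n":
-- 			ligne.append(x)
--
-- 		else:
-- 			ligne.append(x)
-- 			labyrinthe.append(ligne)
-- 			ligne = []
-- 	return labyrinthe
-- ===== SOURCE B (Python) =====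
-- def creer_labyrinthe_depuis_chaine(chaine):
--     """je cree une list de list pour cree le labyrinthre"""
--     return [list(seg + "\n") for seg in chaine.split("\n")]
-- ===== Notes on version B (the rewrite author's own statement) =====
-- stated objective: idiomatic
-- what changed: Replaces the char-by-char accumulator state machine with a single library split on newlines followed by a per-segment reshape into a char list with the newline re-appended.
import Mathlib
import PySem

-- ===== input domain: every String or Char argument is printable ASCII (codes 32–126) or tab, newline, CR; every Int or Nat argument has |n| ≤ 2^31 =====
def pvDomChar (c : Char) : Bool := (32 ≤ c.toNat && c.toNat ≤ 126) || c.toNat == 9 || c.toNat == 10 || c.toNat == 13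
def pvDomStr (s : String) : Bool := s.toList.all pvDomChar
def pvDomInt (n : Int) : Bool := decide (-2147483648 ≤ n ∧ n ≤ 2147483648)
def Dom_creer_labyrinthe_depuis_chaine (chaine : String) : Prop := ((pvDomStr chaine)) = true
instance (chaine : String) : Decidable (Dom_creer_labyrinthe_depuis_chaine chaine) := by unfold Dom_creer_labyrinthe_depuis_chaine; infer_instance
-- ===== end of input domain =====

-- B replaces A's char-by-char state machine with one library split on '\n' plus a per-segment reshape (idiomatic; same cost).


-- ===== PORT A =====
-- one step of A's loop body: state = (ligne, labyrinthe)
def pvStepA (st : List String × List (List String)) (x : Char) : List String × List (List String) :=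
  if x ≠ '\n' then (st.1 ++ [x.toString], st.2)
  else ([], st.2 ++ [st.1 ++ [x.toString]])

def creer_labyrinthe_depuis_chaine (chaine : String) : List (List String) :=
  ((chaine ++ "\n").toList.foldl pvStepA ([], [])).2

-- ===== PORT B =====
def creer_labyrinthe_depuis_chaine_alt (chaine : String) : List (List String) :=
  (chaine.toList.splitOn '\n').map (fun seg => (seg ++ ['\n']).map Char.toString)

-- ===== PRECONDITION & SPEC =====
def Spec_creer_labyrinthe_depuis_chaine (chaine : String) (out : List (List String)) : Prop := out = creer_labyrinthe_depuis_chaine_alt chaine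
instance (chaine : String) (out : List (List String)) : Decidable (Spec_creer_labyrinthe_depuis_chaine chaine out) := by unfold Spec_creer_labyrinthe_depuis_chaine; infer_instance

-- ===== CLAIM (what is proved, stated in full; the proofs are below) =====
def Claim_equal_creer_labyrinthe_depuis_chaine : Prop := ∀ (chaine : String), Dom_creer_labyrinthe_depuis_chaine chaine → Spec_creer_labyrinthe_depuis_chaine chaine (creer_labyrinthe_depuis_chaine chaine)

-- ===== LEMMAS AND PROOFS =====
-- finished line of B for one segment
def pvLine (seg : List Char) : List String := (seg ++ ['\n']).map Char.toString

-- B's result with the pending prefix `ligne` glued onto the first segment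
def pvGlue (ligne : List String) : List (List Char) → List (List String)
  | [] => []
  | seg :: rest => (ligne ++ pvLine seg) :: rest.map pvLine

theorem pvGlue_nil (segs : List (List Char)) : pvGlue [] segs = segs.map pvLine := by
  cases segs <;> simp [pvGlue]

theorem pvGlue_snoc (ligne : List String) (c : Char) (_hc : c ≠ '\n') (segs : List (List Char))
    (hne : segs ≠ []) :
    pvGlue (ligne ++ [c.toString]) segs = pvGlue ligne (segs.modifyHead (c :: ·)) := by
  cases segs with
  | nil => exact absurd rfl hne
  | cons seg rest => simp [pvGlue, pvLine]

theorem pvLoop_eq (cs : List Char) : ∀ (ligne : List String) (lab : List (List String)),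
    (cs ++ ['\n']).foldl pvStepA (ligne, lab) = ([], lab ++ pvGlue ligne (cs.splitOn '\n')) := by
  induction cs with
  | nil =>
      intro ligne lab
      simp [pvStepA, pvGlue, pvLine, List.splitOn]
  | cons c cs ih =>
      intro ligne lab
      by_cases hc : c = '\n'
      · subst hc
        have hsplit : List.splitOn '\n' ('\n' :: cs) = [] :: List.splitOn '\n' cs := by
          simp [List.splitOn, List.splitOnP_cons]
        simp only [List.cons_append, List.foldl_cons, pvStepA, ne_eq, not_true_eq_false,
          if_false, ih, hsplit]
        rw [pvGlue_nil]
        cases h : cs.splitOn '\n' with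
        | nil => exact absurd h (by simpa [List.splitOn] using List.splitOnP_ne_nil (· == '\n') cs)
        | cons seg rest => simp [pvGlue, pvLine]
      · have hne : cs.splitOn '\n' ≠ [] := by
          simpa [List.splitOn] using List.splitOnP_ne_nil (· == '\n') cs
        have hsplit : List.splitOn '\n' (c :: cs) = (cs.splitOn '\n').modifyHead (c :: ·) := by
          simp [List.splitOn, List.splitOnP_cons, hc]
        simp only [List.cons_append, List.foldl_cons, pvStepA, ne_eq, hc, not_false_eq_true,
          if_true, ih, hsplit]
        rw [pvGlue_snoc ligne c hc _ hne]

-- ===== VERDICT (by name: the statement is the Claim_ definition above) =====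
theorem creer_labyrinthe_depuis_chaine_spec : Claim_equal_creer_labyrinthe_depuis_chaine := by
  intro chaine _
  unfold Spec_creer_labyrinthe_depuis_chaine creer_labyrinthe_depuis_chaine
    creer_labyrinthe_depuis_chaine_alt
  have h : (chaine ++ "\n").toList = chaine.toList ++ ['\n'] := by simp
  rw [h, pvLoop_eq, pvGlue_nil]
  simp [pvLine]
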